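-- pv_equiv track=rewrite | github.com/AmyLinck/FEA | topology.py | determine_neighbors
-- ===== SOURCE A (Python) =====
-- def determine_neighbors(factors):
--     neighbors = []
--     for i, factor in enumerate(factors):
--         neighbor = []
--         for j, other_factor in enumerate(factors):
--             if (i != j) and not set(factor).isdisjoint(set(other_factor)):
--                 neighbor.append(j)
--         neighbors.append(neighbor)
--     return neighbors
-- ===== SOURCE B (Python) =====
-- def determine_neighbors(factors):
--     # Inverted index: element -> list of factor indices containing it.
--     index = {}
--     for i, factor in enumerate(factors):
--         for x in set(factor):
--             index.setdefault(x, []).append(i)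
--     neighbors = []
--     for i, factor in enumerate(factors):
--         cand = set()
--         for x in set(factor):
--             cand.update(index[x])
--         cand.discard(i)
--         neighbors.append(sorted(cand))
--     return neighbors
-- ===== Notes on version B (the rewrite author's own statement) =====
-- stated objective: faster
-- what changed: Replaces the all-pairs set-intersection scan with an inverted index element->factor-indices built in one pass; each neighbor row is the sorted union of the posting lists of the factor's elements (minus the factor itself).
import Mathlib
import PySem

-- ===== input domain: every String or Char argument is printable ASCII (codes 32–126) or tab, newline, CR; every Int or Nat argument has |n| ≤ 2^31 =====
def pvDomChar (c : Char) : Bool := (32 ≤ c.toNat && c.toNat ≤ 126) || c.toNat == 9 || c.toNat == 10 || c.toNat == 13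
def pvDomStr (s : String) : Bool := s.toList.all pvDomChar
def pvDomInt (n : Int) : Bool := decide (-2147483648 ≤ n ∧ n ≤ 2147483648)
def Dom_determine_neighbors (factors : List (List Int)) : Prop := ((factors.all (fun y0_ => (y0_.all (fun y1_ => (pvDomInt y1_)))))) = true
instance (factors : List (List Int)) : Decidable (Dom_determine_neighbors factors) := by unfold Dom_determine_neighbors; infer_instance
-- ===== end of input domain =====

-- B replaces the quadratic all-pairs set-intersection scan with an inverted index
-- element → factor indices; each row is the sorted union of posting lists minus self.

-- ===== PORT A =====
def determine_neighbors (factors : List (List Int)) : List (List Int) :=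
  (PySem.List.enumerate factors).foldl
    (fun neighbors p =>
      neighbors ++ [
        (PySem.List.enumerate factors).foldl
          (fun neighbor q =>
            if (p.1 != q.1) && !(PySem.Set.isdisjoint (PySem.Set.ofList p.2) (PySem.Set.ofList q.2))
            then neighbor ++ [q.1] else neighbor) [] ]) []

-- ===== PORT B =====
-- index = {}; for i, factor: for x in set(factor): index.setdefault(x, []).append(i)
def dnIndex (factors : List (List Int)) : PySem.Dict Int (List Int) :=
  (PySem.List.enumerate factors).foldl
    (fun d p => (PySem.Set.ofList p.2).foldl (fun d x => d.modify x [] (· ++ [p.1])) d)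
    PySem.Dict.empty

-- second loop: cand = set(); cand.update(index[x]) for x in set(factor); cand.discard(i); append sorted(cand)
-- (index[x] is ported as getD x []: x ∈ factor guarantees the key is present, so Python never raises here)
def determine_neighbors_alt (factors : List (List Int)) : List (List Int) :=
  let index := dnIndex factors
  (PySem.List.enumerate factors).foldl
    (fun neighbors p =>
      neighbors ++ [PySem.List.sorted
        (PySem.Set.discard
          ((PySem.Set.ofList p.2).foldl
            (fun s x => PySem.Set.update s (index.getD x [])) PySem.Set.empty)
          p.1)
        (fun x => x) false]) []

-- ===== PRECONDITION & SPEC =====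
def Spec_determine_neighbors (factors : List (List Int)) (out : List (List Int)) : Prop := out = determine_neighbors_alt factors
instance (factors : List (List Int)) (out : List (List Int)) : Decidable (Spec_determine_neighbors factors out) := by unfold Spec_determine_neighbors; infer_instance

-- ===== CLAIM (what is proved, stated in full; the proofs are below) =====
def Claim_equal_determine_neighbors : Prop := ∀ (factors : List (List Int)), Dom_determine_neighbors factors → Spec_determine_neighbors factors (determine_neighbors factors)

-- ===== LEMMAS AND PROOFS =====

-- the inverted index, written as one flat modify-loop over (element, index) pairs
theorem dnIndex_getD (factors : List (List Int)) (x : Int) :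
    (dnIndex factors).getD x [] =
      ((((PySem.List.enumerate factors).flatMap
          (fun p => (PySem.Set.ofList p.2).map (fun y => (y, p.1)))).filter
            (fun q => q.1 == x)).map (·.2)) := by
  have h : ((PySem.List.enumerate factors).flatMap
        (fun p => (PySem.Set.ofList p.2).map (fun y => (y, p.1)))).foldl
        (fun (d : PySem.Dict Int (List Int)) q => d.modify q.1 [] (· ++ [q.2])) PySem.Dict.empty
      = dnIndex factors := by
    unfold dnIndex
    rw [List.foldl_flatMap]
    simp only [List.foldl_map]
  rw [← h, PySem.Dict.getD_foldl_modify_append]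
  simp [PySem.Dict.empty, PySem.Dict.getD, PySem.Dict.get?]

-- posting list of x: exactly the indices j with x ∈ factors[j]
theorem mem_dnIndex_getD (factors : List (List Int)) (x j : Int) :
    j ∈ (dnIndex factors).getD x [] ↔
      ∃ p ∈ PySem.List.enumerate factors, p.1 = j ∧ x ∈ p.2 := by
  rw [dnIndex_getD]
  simp only [List.mem_map, List.mem_filter, List.mem_flatMap, PySem.Set.mem_ofList, beq_iff_eq]
  constructor
  · rintro ⟨a, ⟨⟨p, hp, y, hy, rfl⟩, h1⟩, h2⟩
    exact ⟨p, hp, h2, h1 ▸ hy⟩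
  · rintro ⟨p, hp, rfl, hx⟩
    exact ⟨(x, p.1), ⟨⟨p, hp, x, hx, rfl⟩, rfl⟩, rfl⟩

-- membership in B's accumulated candidate set (cand.update(...) loop)
theorem mem_foldl_update (l : List Int) (g : Int → List Int) (s0 : PySem.Set Int) (j : Int) :
    (j ∈ l.foldl (fun s x => PySem.Set.update s (g x)) s0) ↔ j ∈ s0 ∨ ∃ x ∈ l, j ∈ g x := by
  induction l generalizing s0 with
  | nil => simp
  | cons x l ih =>
    simp only [List.foldl_cons, ih, PySem.Set.mem_update, List.mem_cons]
    constructor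
    · rintro ((h|h)|⟨y,hy,hj⟩)
      · exact Or.inl h
      · exact Or.inr ⟨x, Or.inl rfl, h⟩
      · exact Or.inr ⟨y, Or.inr hy, hj⟩
    · rintro (h|⟨y,(rfl|hy),hj⟩)
      · exact Or.inl (Or.inl h)
      · exact Or.inl (Or.inr hj)
      · exact Or.inr ⟨y, hy, hj⟩

theorem nodup_foldl_update (l : List Int) (g : Int → List Int) (s0 : PySem.Set Int)
    (h : s0.Nodup) : (l.foldl (fun s x => PySem.Set.update s (g x)) s0).Nodup := by
  induction l generalizing s0 with
  | nil => exact h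
  | cons x l ih => exact ih _ (PySem.Set.nodup_update s0 (g x) h)

theorem pairwise_fst_enumerate (xs : List (List Int)) :
    (PySem.List.enumerate xs).Pairwise (fun a b => a.1 < b.1) := by
  have h := PySem.List.pairwise_lt_pyRange_one (a := 0) (b := 0 + xs.length)
  rw [← PySem.List.map_fst_enumerate] at h
  exact (List.pairwise_map).mp h

theorem isdisjoint_eq_false_iff (s t : PySem.Set Int) :
    (PySem.Set.isdisjoint s t = false) ↔ ∃ x ∈ s, x ∈ t := by
  rw [Bool.eq_false_iff, Ne, PySem.Set.isdisjoint_iff]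
  push Not; rfl

-- the row A computes for a given (i, factor) equals the row B computes for it
theorem row_eq (factors : List (List Int)) (p : Int × List Int) :
    ((PySem.List.enumerate factors).filter
        (fun q => (p.1 != q.1) && !(PySem.Set.isdisjoint (PySem.Set.ofList p.2) (PySem.Set.ofList q.2)))).map (·.1)
      = PySem.List.sorted
          (PySem.Set.discard
            ((PySem.Set.ofList p.2).foldl
              (fun s x => PySem.Set.update s ((dnIndex factors).getD x [])) PySem.Set.empty)
            p.1)
          (fun x => x) false := by
  have hpair : (((PySem.List.enumerate factors).filter
        (fun q => (p.1 != q.1) && !(PySem.Set.isdisjoint (PySem.Set.ofList p.2) (PySem.Set.ofList q.2)))).map (·.1)).Pairwise (· < ·) :=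
    (List.pairwise_map).mpr ((pairwise_fst_enumerate factors).filter _)
  refine (PySem.List.sorted_eq_of_perm_of_pairwise_lt _ _ _ ?_ hpair).symm
  refine (List.perm_ext_iff_of_nodup (hpair.nodup) ?_).mpr ?_
  · exact PySem.Set.nodup_discard _ _ (nodup_foldl_update _ _ _ List.nodup_nil)
  · intro a
    simp only [List.mem_map, List.mem_filter, Bool.and_eq_true, bne_iff_ne,
      Bool.not_eq_true', isdisjoint_eq_false_iff, PySem.Set.mem_ofList,
      PySem.Set.mem_discard, mem_foldl_update, mem_dnIndex_getD,
      PySem.Set.empty, List.not_mem_nil, false_or]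
    constructor
    · rintro ⟨q, ⟨hq, hne, x, hxp, hxq⟩, rfl⟩
      exact ⟨⟨x, hxp, q, hq, rfl, hxq⟩, fun h => hne h.symm⟩
    · rintro ⟨⟨x, hxp, q, hq, rfl, hxq⟩, hne⟩
      exact ⟨q, ⟨hq, fun h => hne h.symm, x, hxp, hxq⟩, rfl⟩

-- ===== VERDICT (by name: the statement is the Claim_ definition above) =====
theorem determine_neighbors_spec : Claim_equal_determine_neighbors := by
  intro factors _
  unfold Spec_determine_neighbors determine_neighbors determine_neighbors_alt
  simp only [PySem.List.foldl_append_singleton_eq_map, PySem.List.foldl_append_if, List.nil_append]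
  exact List.map_congr_left (fun p _ => row_eq factors p)
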